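-- pv_equiv track=rewrite | github.com/etneuhct/decodeur | substitution_mono.py | get_tableau_frequence
-- ===== SOURCE A (Python) =====
-- def get_tableau_frequence(alphabet, source):
--     tableau_frequence = {}
--     for lettre in alphabet:
--         tableau_frequence[lettre] = {}
--         for mot in source:
--             if lettre in mot:
--                 occurence = [index for index, value in enumerate(list(mot)) if value == lettre]
--                 for i in occurence:
--                     if i in tableau_frequence[lettre]:
--                         tableau_frequence[lettre][i].append(mot)
--                     else:
--                         tableau_frequence[lettre][i] = [mot]
--     return tableau_frequence
-- ===== SOURCE B (Python) =====
-- def get_tableau_frequence(alphabet, source):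
--     # One pass over the words/characters; then project onto the alphabet.
--     table = {}
--     for mot in source:
--         for i, lettre in enumerate(mot):
--             table.setdefault(lettre, {}).setdefault(i, []).append(mot)
--     return {lettre: table.get(lettre, {}) for lettre in alphabet}
-- ===== Notes on version B (the rewrite author's own statement) =====
-- stated objective: faster
-- what changed: Instead of scanning the whole source once per alphabet letter with a per-word index comprehension, B makes a single pass over every character of every word, appending the word under (char, index) directly, and then projects the resulting table onto the alphabet.
import Mathlib
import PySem

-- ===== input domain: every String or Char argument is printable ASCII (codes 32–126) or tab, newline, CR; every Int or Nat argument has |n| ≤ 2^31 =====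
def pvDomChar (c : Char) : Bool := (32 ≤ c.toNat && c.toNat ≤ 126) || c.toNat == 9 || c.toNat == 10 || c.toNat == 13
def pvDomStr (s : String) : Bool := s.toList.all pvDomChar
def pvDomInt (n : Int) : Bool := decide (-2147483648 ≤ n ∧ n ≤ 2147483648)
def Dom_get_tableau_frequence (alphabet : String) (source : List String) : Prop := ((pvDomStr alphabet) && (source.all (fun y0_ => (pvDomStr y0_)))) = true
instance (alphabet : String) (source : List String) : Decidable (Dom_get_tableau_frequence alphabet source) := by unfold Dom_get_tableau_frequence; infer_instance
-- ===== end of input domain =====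

-- B replaces A's per-alphabet-letter rescans of the whole source by a single pass over every
-- character of every word that appends the word under (char, index), then projects onto the alphabet.

-- ===== PORT A =====
def get_tableau_frequence (alphabet : String) (source : List String) : List (String × List (Int × List String)) :=
  let tf : PySem.Dict String (PySem.Dict Int (List String)) :=
    alphabet.toList.foldl (fun tf lettre =>
      let l := String.ofList [lettre]
      let tf := tf.insert l PySem.Dict.empty
      source.foldl (fun tf mot =>
        if PySem.Str.isIn l mot then
          let occurence := ((PySem.List.enumerate mot.toList 0).filter (fun p => p.2 = lettre)).map (·.1)
          occurence.foldl (fun tf i =>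
            let inner := tf.getD l PySem.Dict.empty
            if inner.contains i then
              tf.insert l (inner.insert i (inner.getD i [] ++ [mot]))
            else
              tf.insert l (inner.insert i [mot])) tf
        else tf) tf) PySem.Dict.empty
  tf.items.map (fun p => (p.1, p.2.items))

-- ===== PORT B =====
def get_tableau_frequence_alt (alphabet : String) (source : List String) : List (String × List (Int × List String)) :=
  let table : PySem.Dict Char (PySem.Dict Int (List String)) :=
    source.foldl (fun t mot =>
      (PySem.List.enumerate mot.toList 0).foldl (fun t p =>
        t.modify p.2 PySem.Dict.empty (fun inner => inner.modify p.1 [] (· ++ [mot]))) t) PySem.Dict.empty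
  let res : PySem.Dict String (PySem.Dict Int (List String)) :=
    alphabet.toList.foldl (fun r lettre =>
      r.insert (String.ofList [lettre]) (table.getD lettre PySem.Dict.empty)) PySem.Dict.empty
  res.items.map (fun p => (p.1, p.2.items))

-- ===== PRECONDITION & SPEC =====
def Spec_get_tableau_frequence (alphabet : String) (source : List String) (out : List (String × List (Int × List String))) : Prop := out = get_tableau_frequence_alt alphabet source
instance (alphabet : String) (source : List String) (out : List (String × List (Int × List String))) : Decidable (Spec_get_tableau_frequence alphabet source out) := by unfold Spec_get_tableau_frequence; infer_instance

-- ===== CLAIM (what is proved, stated in full; the proofs are below) =====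
def Claim_equal_get_tableau_frequence : Prop := ∀ (alphabet : String) (source : List String), Dom_get_tableau_frequence alphabet source → Spec_get_tableau_frequence alphabet source (get_tableau_frequence alphabet source)

-- ===== LEMMAS AND PROOFS =====

-- the per-word update of the letter's inner dict, shared shape of both sides
def pvOccFold (lettre : Char) (mot : String) (inner : PySem.Dict Int (List String)) : PySem.Dict Int (List String) :=
  ((PySem.List.enumerate mot.toList 0).filter (fun p => p.2 = lettre)).foldl
    (fun inner p => inner.modify p.1 [] (· ++ [mot])) inner

-- the inner dict a letter ends up with
def pvInnerA (lettre : Char) (source : List String) : PySem.Dict Int (List String) :=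
  source.foldl (fun inner mot => pvOccFold lettre mot inner) PySem.Dict.empty

theorem pv_step_eq (inner : PySem.Dict Int (List String)) (i : Int) (mot : String) :
    (if inner.contains i then inner.insert i (inner.getD i [] ++ [mot]) else inner.insert i [mot])
      = inner.modify i [] (· ++ [mot]) := by
  by_cases h : inner.contains i <;> simp [PySem.Dict.modify, h, PySem.Dict.getD_of_not_contains]

theorem pv_occ_loop (L : String) (mot : String) :
    ∀ (ps : List (Int × Char)) (tf : PySem.Dict String (PySem.Dict Int (List String)))
      (inner : PySem.Dict Int (List String)),
    ps.foldl (fun tf p =>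
        if (tf.getD L PySem.Dict.empty).contains p.1 then
          tf.insert L ((tf.getD L PySem.Dict.empty).insert p.1 ((tf.getD L PySem.Dict.empty).getD p.1 [] ++ [mot]))
        else tf.insert L ((tf.getD L PySem.Dict.empty).insert p.1 [mot])) (tf.insert L inner)
      = tf.insert L (ps.foldl (fun inner p => inner.modify p.1 [] (· ++ [mot])) inner) := by
  intro ps
  induction ps with
  | nil => intro tf inner; rfl
  | cons p ps ih =>
    intro tf inner
    have hstep : (if ((tf.insert L inner).getD L PySem.Dict.empty).contains p.1 then
          (tf.insert L inner).insert L (((tf.insert L inner).getD L PySem.Dict.empty).insert p.1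
            (((tf.insert L inner).getD L PySem.Dict.empty).getD p.1 [] ++ [mot]))
        else (tf.insert L inner).insert L (((tf.insert L inner).getD L PySem.Dict.empty).insert p.1 [mot]))
        = tf.insert L (inner.modify p.1 [] (· ++ [mot])) := by
      rw [← pv_step_eq]
      simp only [PySem.Dict.getD_insert_self]
      split <;> rw [PySem.Dict.insert_insert_self]
    simp only [List.foldl_cons]
    rw [hstep, ih]

theorem pv_filter_nil (lettre : Char) (mot : String)
    (h : PySem.Str.isIn (String.ofList [lettre]) mot = false) :
    (PySem.List.enumerate mot.toList 0).filter (fun p => p.2 = lettre) = [] := by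
  have hnot : lettre ∉ mot.toList := by
    intro hc
    obtain ⟨s, t, hst⟩ := List.append_of_mem hc
    have : PySem.Str.isIn (String.ofList [lettre]) mot = true := by
      rw [PySem.Str.isIn_iff_infix, hst]
      exact ⟨s, t, by simp⟩
    rw [h] at this
    exact absurd this (by decide)
  rw [List.filter_eq_nil_iff]
  intro p hp
  have hmem : p.2 ∈ mot.toList := by
    have := List.mem_map_of_mem (f := fun q : Int × Char => q.2) hp
    rwa [PySem.List.map_snd_enumerate] at this
  simp only [decide_eq_true_eq]
  intro e; exact hnot (e ▸ hmem)

theorem pv_src_loop (lettre : Char) :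
    ∀ (src : List String) (tf : PySem.Dict String (PySem.Dict Int (List String)))
      (inner : PySem.Dict Int (List String)),
    src.foldl (fun tf mot =>
        if PySem.Str.isIn (String.ofList [lettre]) mot then
          (((PySem.List.enumerate mot.toList 0).filter (fun p => p.2 = lettre)).map (·.1)).foldl
            (fun tf i =>
              if (tf.getD (String.ofList [lettre]) PySem.Dict.empty).contains i then
                tf.insert (String.ofList [lettre]) ((tf.getD (String.ofList [lettre]) PySem.Dict.empty).insert i ((tf.getD (String.ofList [lettre]) PySem.Dict.empty).getD i [] ++ [mot]))
              else tf.insert (String.ofList [lettre]) ((tf.getD (String.ofList [lettre]) PySem.Dict.empty).insert i [mot])) tf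
        else tf) (tf.insert (String.ofList [lettre]) inner)
      = tf.insert (String.ofList [lettre]) (src.foldl (fun inner mot => pvOccFold lettre mot inner) inner) := by
  intro src
  induction src with
  | nil => intro tf inner; rfl
  | cons mot src ih =>
    intro tf inner
    simp only [List.foldl_cons]
    by_cases hin : PySem.Str.isIn (String.ofList [lettre]) mot
    · rw [if_pos hin, List.foldl_map, pv_occ_loop, ih]
      simp only [pvOccFold]
    · rw [if_neg hin, ih]
      have : pvOccFold lettre mot inner = inner := by
        unfold pvOccFold
        rw [pv_filter_nil lettre mot (by simpa using hin)]
        rfl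
      rw [this]

theorem pv_proj_word (lettre : Char) (mot : String) :
    ∀ (ps : List (Int × Char)) (t : PySem.Dict Char (PySem.Dict Int (List String))),
    (ps.foldl (fun t p =>
        t.modify p.2 PySem.Dict.empty (fun inner => inner.modify p.1 [] (· ++ [mot]))) t).getD lettre PySem.Dict.empty
      = (ps.filter (fun p => p.2 = lettre)).foldl (fun inner p => inner.modify p.1 [] (· ++ [mot]))
          (t.getD lettre PySem.Dict.empty) := by
  intro ps
  induction ps with
  | nil => intro t; rfl
  | cons p ps ih =>
    intro t
    simp only [List.foldl_cons, List.filter_cons]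
    by_cases hc : p.2 = lettre
    · rw [ih, PySem.Dict.getD_modify, if_pos hc.symm]
      simp [hc]
    · rw [ih, PySem.Dict.getD_modify, if_neg (fun e => hc e.symm)]
      simp [hc]

theorem pv_proj_src (lettre : Char) :
    ∀ (src : List String) (t : PySem.Dict Char (PySem.Dict Int (List String))),
    (src.foldl (fun t mot =>
        (PySem.List.enumerate mot.toList 0).foldl (fun t p =>
          t.modify p.2 PySem.Dict.empty (fun inner => inner.modify p.1 [] (· ++ [mot]))) t) t).getD lettre PySem.Dict.empty
      = src.foldl (fun inner mot => pvOccFold lettre mot inner) (t.getD lettre PySem.Dict.empty) := by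
  intro src
  induction src with
  | nil => intro t; rfl
  | cons mot src ih =>
    intro t
    simp only [List.foldl_cons]
    rw [ih, pv_proj_word]
    simp only [pvOccFold]

theorem pv_A_char (src : List String) :
    ∀ (letters : List Char) (tf : PySem.Dict String (PySem.Dict Int (List String))),
    letters.foldl (fun tf lettre =>
        src.foldl (fun tf mot =>
          if PySem.Str.isIn (String.ofList [lettre]) mot then
            (((PySem.List.enumerate mot.toList 0).filter (fun p => p.2 = lettre)).map (·.1)).foldl
              (fun tf i =>
                if (tf.getD (String.ofList [lettre]) PySem.Dict.empty).contains i then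
                  tf.insert (String.ofList [lettre]) ((tf.getD (String.ofList [lettre]) PySem.Dict.empty).insert i ((tf.getD (String.ofList [lettre]) PySem.Dict.empty).getD i [] ++ [mot]))
                else tf.insert (String.ofList [lettre]) ((tf.getD (String.ofList [lettre]) PySem.Dict.empty).insert i [mot])) tf
          else tf) (tf.insert (String.ofList [lettre]) PySem.Dict.empty)) tf
      = letters.foldl (fun tf lettre => tf.insert (String.ofList [lettre]) (pvInnerA lettre src)) tf := by
  intro letters
  induction letters with
  | nil => intro tf; rfl
  | cons lettre letters ih =>
    intro tf
    simp only [List.foldl_cons]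
    rw [pv_src_loop, ih]
    simp only [pvInnerA]

theorem pv_B_char (src : List String) :
    ∀ (letters : List Char) (r : PySem.Dict String (PySem.Dict Int (List String))),
    letters.foldl (fun r lettre =>
        r.insert (String.ofList [lettre]) ((src.foldl (fun t mot =>
          (PySem.List.enumerate mot.toList 0).foldl (fun t p =>
            t.modify p.2 PySem.Dict.empty (fun inner => inner.modify p.1 [] (· ++ [mot]))) t)
          PySem.Dict.empty).getD lettre PySem.Dict.empty)) r
      = letters.foldl (fun tf lettre => tf.insert (String.ofList [lettre]) (pvInnerA lettre src)) r := by
  intro letters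
  induction letters with
  | nil => intro r; rfl
  | cons lettre letters ih =>
    intro r
    simp only [List.foldl_cons]
    rw [pv_proj_src, PySem.Dict.getD_empty, ih]
    simp only [pvInnerA]

-- ===== VERDICT (by name: the statement is the Claim_ definition above) =====
theorem get_tableau_frequence_spec : Claim_equal_get_tableau_frequence := by
  intro alphabet source _
  unfold Spec_get_tableau_frequence get_tableau_frequence get_tableau_frequence_alt
  dsimp only
  rw [pv_A_char source alphabet.toList PySem.Dict.empty,
      ← pv_B_char source alphabet.toList PySem.Dict.empty]
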